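-- pv_equiv track=rewrite | github.com/AnirudhPenmatcha/B505-Applied-Algorithms | Assignment 3/Assignment 3.py | shorterBuildings
-- ===== SOURCE A (Python) =====
-- def shorterBuildings(heights):
--     def mergesort(height_index_pairs, result):
--         if len(height_index_pairs) > 1:
--             mid = len(height_index_pairs) // 2
--             left_half = height_index_pairs[:mid]
--             right_half = height_index_pairs[mid:]
--
--             mergesort(left_half, result)
--             mergesort(right_half, result)
--
--             i = j = k = 0
--             while i<len(left_half) and j < len(right_half):
--                 if left_half[i][0] > right_half[j][0]:
--                     result[left_half[i][1]] += len(right_half) - j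
--                     height_index_pairs[k] = left_half[i]
--                     i += 1
--                 else:
--                     height_index_pairs[k] = right_half[j]
--                     j += 1
--                 k += 1
--
--             while i < len(left_half):
--                 height_index_pairs[k] = left_half[i]
--                 k += 1
--                 i += 1
--
--             while j < len(right_half):
--                 height_index_pairs[k] = right_half[j]
--                 k += 1
--                 j += 1
--
--     result = [0] * len(heights)
--     height_index_pairs = [(heights[i], i) for i in range(len(heights))]
--
--     mergesort(height_index_pairs, result)
--
--     return result
-- ===== SOURCE B (Python) =====
-- import bisect
--
-- def shorterBuildings(heights):
--     # Right-to-left scan keeping a sorted list of the heights already seen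
--     # (those to the right); bisect_left gives the count of strictly smaller ones.
--     n = len(heights)
--     result = [0] * n
--     seen = []
--     for i in range(n - 1, -1, -1):
--         h = heights[i]
--         result[i] = bisect.bisect_left(seen, h)
--         bisect.insort(seen, h)
--     return result
-- ===== Notes on version B (the rewrite author's own statement) =====
-- stated objective: simpler
-- what changed: Replaces the recursive merge-sort inversion count (with an in-place mutated result array) by a single right-to-left scan that keeps a sorted list of already-seen heights and reads each answer off with bisect_left.
import Mathlib
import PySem

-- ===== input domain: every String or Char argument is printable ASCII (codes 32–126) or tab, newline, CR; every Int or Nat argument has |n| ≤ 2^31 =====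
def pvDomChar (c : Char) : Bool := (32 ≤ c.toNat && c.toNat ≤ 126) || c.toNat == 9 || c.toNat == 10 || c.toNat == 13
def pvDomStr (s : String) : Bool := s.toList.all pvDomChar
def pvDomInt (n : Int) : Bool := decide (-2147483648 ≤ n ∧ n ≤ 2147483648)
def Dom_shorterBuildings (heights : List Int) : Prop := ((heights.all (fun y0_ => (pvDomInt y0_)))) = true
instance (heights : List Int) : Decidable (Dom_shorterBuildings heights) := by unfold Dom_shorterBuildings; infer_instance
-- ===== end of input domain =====

-- B replaces A's recursive merge-sort inversion count by a right-to-left scan over a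
-- sorted list of already-seen heights (bisect_left / insort); objective: simpler.

-- ===== PORT A =====
-- result[i] += x  (i is always a valid nonnegative index produced by range(len(heights)), so Nat)
def pvBumpA (res : List Int) (i : Nat) (x : Int) : List Int := res.set i (res.getD i 0 + x)

-- the merge phase of A's mergesort: the three while-loops, counting as it merges.
-- left_half[i][0] > right_half[j][0]  ⇝  r.1 < l.1; on that branch result[l.2] += len(right)-j.
def pvMergeA : List (Int × Nat) → List (Int × Nat) → List Int → List (Int × Nat) × List Int
  | [], right, res => (right, res)
  | l :: ls, [], res => (l :: ls, res)
  | l :: ls, r :: rs, res =>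
    if r.1 < l.1 then
      let out := pvMergeA ls (r :: rs) (pvBumpA res l.2 ((rs.length : Int) + 1))
      (l :: out.1, out.2)
    else
      let out := pvMergeA (l :: ls) rs res
      (r :: out.1, out.2)

-- A's recursive mergesort: splits at len//2, sorts both halves, merges; the Python mutates
-- height_index_pairs and result in place, modelled here by returning the pair (pairs, result).
def pvMergesortA (pairs : List (Int × Nat)) (res : List Int) : List (Int × Nat) × List Int :=
  if h : pairs.length > 1 then
    let mid := pairs.length / 2
    let o1 := pvMergesortA (pairs.take mid) res
    let o2 := pvMergesortA (pairs.drop mid) o1.2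
    pvMergeA o1.1 o2.1 o2.2
  else (pairs, res)
termination_by pairs.length
decreasing_by
  · simp only [List.length_take]; omega
  · simp only [List.length_drop]; omega

def shorterBuildings (heights : List Int) : List Int :=
  -- result = [0]*len(heights); pairs = [(heights[i], i) for i in range(len(heights))]
  (pvMergesortA heights.zipIdx (List.replicate heights.length 0)).2

-- ===== PORT B =====
-- the loop 'for i in reversed(range(n))': process the suffix first (its sorted multiset is
-- `seen`), then read off bisect_left(seen, h) and insort h; returns (result, seen).
def pvAltGo : List Int → List Int × List Int
  | [] => ([], [])
  | h :: rest =>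
    let o := pvAltGo rest
    (((PySem.List.bisectLeft o.2 h : Nat) : Int) :: o.1,
     PySem.List.insertBy (fun a b => decide (a < b)) h o.2)

def shorterBuildings_alt (heights : List Int) : List Int := (pvAltGo heights).1

-- ===== PRECONDITION & SPEC =====
def Spec_shorterBuildings (heights : List Int) (out : List Int) : Prop := out = shorterBuildings_alt heights
instance (heights : List Int) (out : List Int) : Decidable (Spec_shorterBuildings heights out) := by unfold Spec_shorterBuildings; infer_instance

-- ===== CLAIM (what is proved, stated in full; the proofs are below) =====
def Claim_equal_shorterBuildings : Prop := ∀ (heights : List Int), Dom_shorterBuildings heights → Spec_shorterBuildings heights (shorterBuildings heights)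

-- ===== LEMMAS AND PROOFS =====

-- the common specification: out[i] = number of strictly smaller elements to the right of i
def pvCntS (h : Int) (xs : List Int) : Int := ((xs.countP fun x => decide (x < h) : Nat) : Int)

def pvSpecList : List Int → List Int
  | [] => []
  | h :: rest => pvCntS h rest :: pvSpecList rest

theorem pvSpecList_length (xs : List Int) : (pvSpecList xs).length = xs.length := by
  induction xs with
  | nil => rfl
  | cons h rest ih => simp [pvSpecList, ih]

-- ---------- B side ----------

theorem pvInsertBy_perm (b : Int → Int → Bool) (x : Int) (ys : List Int) :
    (PySem.List.insertBy b x ys).Perm (x :: ys) := by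
  induction ys with
  | nil => simp [PySem.List.insertBy]
  | cons y ys ih =>
    simp only [PySem.List.insertBy]
    split
    · exact List.Perm.refl _
    · exact (List.Perm.cons y ih).trans (List.Perm.swap x y ys)

theorem pvInsertBy_sorted (x : Int) (ys : List Int)
    (hs : ys.Pairwise (· ≤ ·)) :
    (PySem.List.insertBy (fun a b => decide (a < b)) x ys).Pairwise (· ≤ ·) := by
  induction ys with
  | nil => simp [PySem.List.insertBy]
  | cons y ys ih =>
    rcases List.pairwise_cons.mp hs with ⟨hy, hys⟩
    simp only [PySem.List.insertBy]
    split
    · rename_i hxy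
      refine List.pairwise_cons.mpr ⟨?_, hs⟩
      intro a ha
      rcases List.mem_cons.mp ha with rfl | ha
      · exact le_of_lt (by simpa using hxy)
      · exact le_trans (le_of_lt (by simpa using hxy)) (hy a ha)
    · rename_i hxy
      refine List.pairwise_cons.mpr ⟨?_, ih hys⟩
      intro a ha
      rcases (PySem.List.mem_insertBy _ x a ys).mp ha with rfl | ha
      · simpa using hxy
      · exact hy a ha
  
theorem pvAltGo_snd (xs : List Int) :
    (pvAltGo xs).2.Perm xs ∧ (pvAltGo xs).2.Pairwise (· ≤ ·) := by
  induction xs with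
  | nil => simp [pvAltGo]
  | cons h rest ih =>
    refine ⟨?_, pvInsertBy_sorted h _ ih.2⟩
    exact (pvInsertBy_perm _ h _).trans (ih.1.cons h)

theorem pvBisectLeft_countP (xs : List Int) (x : Int) (hs : xs.Pairwise (· ≤ ·)) :
    PySem.List.bisectLeft xs x = xs.countP (fun y => decide (y < x)) := by
  obtain ⟨hk, hlt, hge⟩ := PySem.List.bisectLeft_spec xs x hs
  set k := PySem.List.bisectLeft xs x with hkdef
  have hsplit : xs = xs.take k ++ xs.drop k := (List.take_append_drop k xs).symm
  have h1 : (xs.take k).countP (fun y => decide (y < x)) = (xs.take k).length := by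
    apply List.countP_eq_length.mpr
    intro a ha
    rcases List.mem_iff_getElem.mp ha with ⟨j, hj, rfl⟩
    have hjk : j < k := lt_of_lt_of_le hj (by simp [List.length_take])
    have hjlen : j < xs.length := lt_of_lt_of_le hjk hk
    have := hlt j hjlen hjk
    simpa [List.getElem_take] using this
  have h2 : (xs.drop k).countP (fun y => decide (y < x)) = 0 := by
    apply List.countP_eq_zero.mpr
    intro a ha
    rcases List.mem_iff_getElem.mp ha with ⟨j, hj, rfl⟩
    have hj' : j < xs.length - k := by simpa [List.length_drop] using hj
    have hjlen : k + j < xs.length := by omega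
    have := hge (k + j) hjlen (Nat.le_add_right _ _)
    simp [List.getElem_drop]
    omega
  have : xs.countP (fun y => decide (y < x)) = (xs.take k).length := by
    conv_lhs => rw [hsplit]
    rw [List.countP_append, h1, h2, Nat.add_zero]
  rw [this, List.length_take, Nat.min_eq_left hk]

theorem pvAlt_eq_spec (xs : List Int) : shorterBuildings_alt xs = pvSpecList xs := by
  unfold shorterBuildings_alt
  induction xs with
  | nil => rfl
  | cons h rest ih =>
    simp only [pvAltGo, pvSpecList]
    refine congrArg₂ (· :: ·) ?_ ih
    have hsnd := pvAltGo_snd rest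
    rw [pvBisectLeft_countP _ h hsnd.2, hsnd.1.countP_eq]
    rfl

-- ---------- A side ----------

-- total amount that the mergesort adds into result[k]: for each pair in list order, the
-- number of LATER pairs with strictly smaller height (inversions), collected at its index.
def pvInv : List (Int × Nat) → Nat → Int
  | [], _ => 0
  | p :: rest, k =>
    (if p.2 = k then ((rest.countP fun q => decide (q.1 < p.1) : Nat) : Int) else 0) + pvInv rest k

-- cross-half inversions: pairs of left against the whole of right
def pvCross (left right : List (Int × Nat)) (k : Nat) : Int :=
  (left.map fun l => if l.2 = k then ((right.countP fun q => decide (q.1 < l.1) : Nat) : Int) else 0).sum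

theorem pvBumpA_length (res : List Int) (i : Nat) (x : Int) :
    (pvBumpA res i x).length = res.length := by simp [pvBumpA]

theorem pvBumpA_getD (res : List Int) (i : Nat) (x : Int) (hi : i < res.length) (k : Nat) :
    (pvBumpA res i x).getD k 0 = res.getD k 0 + (if i = k then x else 0) := by
  unfold pvBumpA
  by_cases hik : i = k
  · subst hik
    simp [List.getD, List.getElem?_set_self hi]
  · simp [List.getD, List.getElem?_set_ne hik, hik]

theorem pvCross_cons_right (left : List (Int × Nat)) (r : Int × Nat) (rs : List (Int × Nat))
    (k : Nat) (hle : ∀ l ∈ left, l.1 ≤ r.1) :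
    pvCross left (r :: rs) k = pvCross left rs k := by
  unfold pvCross
  congr 1
  apply List.map_congr_left
  intro l hl
  have : ¬ (r.1 < l.1) := not_lt.mpr (hle l hl)
  simp [this]

theorem pvCross_perm (left left' right right' : List (Int × Nat)) (k : Nat)
    (hl : left.Perm left') (hr : right.Perm right') :
    pvCross left right k = pvCross left' right' k := by
  unfold pvCross
  have hmap : ∀ (L : List (Int × Nat)),
      (L.map fun l => if l.2 = k then ((right.countP fun q => decide (q.1 < l.1) : Nat) : Int) else 0)
        = (L.map fun l => if l.2 = k then ((right'.countP fun q => decide (q.1 < l.1) : Nat) : Int) else 0) := by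
    intro L
    apply List.map_congr_left
    intro l _
    rw [hr.countP_eq]
  rw [hmap]
  exact (hl.map _).sum_eq

theorem pvInv_append (L R : List (Int × Nat)) (k : Nat) :
    pvInv (L ++ R) k = pvInv L k + pvInv R k + pvCross L R k := by
  induction L with
  | nil => simp [pvInv, pvCross]
  | cons p ls ih =>
    simp only [List.cons_append, pvInv, ih, pvCross, List.map_cons, List.sum_cons,
      List.countP_append]
    push_cast
    ring_nf
    by_cases hp : p.2 = k
    · simp [hp]; ring
    · simp [hp]

-- the merge lemma: pvMergeA permutes, keeps weak descending order, and adds pvCross into result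
theorem pvMergeA_spec (left right : List (Int × Nat)) (res : List Int) :
    left.Pairwise (fun p q => q.1 ≤ p.1) → right.Pairwise (fun p q => q.1 ≤ p.1) →
    (∀ l ∈ left, l.2 < res.length) →
    (pvMergeA left right res).1.Perm (left ++ right) ∧
    (pvMergeA left right res).1.Pairwise (fun p q => q.1 ≤ p.1) ∧
    (pvMergeA left right res).2.length = res.length ∧
    ∀ k, (pvMergeA left right res).2.getD k 0 = res.getD k 0 + pvCross left right k := by
  fun_induction pvMergeA left right res with
  | case1 right res =>
    intro _ hr _
    simp [pvCross, hr]
  | case2 l ls res =>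
    intro hl _ _
    refine ⟨by simp, hl, rfl, ?_⟩
    intro k
    have : pvCross (l :: ls) [] k = 0 := by
      unfold pvCross
      rw [List.sum_eq_zero]
      intro y hy
      rcases List.mem_map.mp hy with ⟨a, _, rfl⟩
      simp
    simp [this]
  | case3 l ls r rs res hlt out ih =>
    intro hl hr hidx
    rcases List.pairwise_cons.mp hl with ⟨hlhead, hltail⟩
    rcases List.pairwise_cons.mp hr with ⟨hrhead, hrtail⟩
    have hidx' : ∀ p ∈ ls, p.2 < (pvBumpA res l.2 ((rs.length : Int) + 1)).length := by
      intro p hp; rw [pvBumpA_length]; exact hidx p (List.mem_cons_of_mem _ hp)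
    obtain ⟨ihp, ihs, ihlen, ihget⟩ := ih hltail hr hidx'
    have hperm : (l :: out.1).Perm ((l :: ls) ++ (r :: rs)) := by
      simpa using ihp.cons l
    refine ⟨hperm, ?_, by rw [ihlen, pvBumpA_length], ?_⟩
    · refine List.pairwise_cons.mpr ⟨?_, ihs⟩
      intro q hq
      have hq' : q ∈ ls ++ (r :: rs) := ihp.mem_iff.mp hq
      rcases List.mem_append.mp hq' with h | h
      · exact hlhead q h
      · rcases List.mem_cons.mp h with rfl | h
        · exact le_of_lt hlt
        · exact le_trans (hrhead q h) (le_of_lt hlt)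
    · intro k
      rw [ihget k, pvBumpA_getD res l.2 _ (hidx l (List.mem_cons_self)) k]
      have hcount : ((r :: rs).countP fun q => decide (q.1 < l.1)) = rs.length + 1 := by
        have : ((r :: rs).countP fun q => decide (q.1 < l.1)) = (r :: rs).length :=
          List.countP_eq_length.mpr (by
            intro a ha
            rcases List.mem_cons.mp ha with rfl | ha
            · simpa using hlt
            · simp only [decide_eq_true_eq]
              exact lt_of_le_of_lt (hrhead a ha) hlt)
        simpa using this
      have hcross : pvCross (l :: ls) (r :: rs) k
          = (if l.2 = k then ((rs.length : Int) + 1) else 0) + pvCross ls (r :: rs) k := by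
        unfold pvCross
        simp only [List.map_cons, List.sum_cons, hcount]
        push_cast
        ring_nf
      rw [hcross]
      ring
  | case4 l ls r rs res hlt out ih =>
    intro hl hr hidx
    rcases List.pairwise_cons.mp hl with ⟨hlhead, hltail⟩
    rcases List.pairwise_cons.mp hr with ⟨hrhead, hrtail⟩
    obtain ⟨ihp, ihs, ihlen, ihget⟩ := ih hl hrtail hidx
    have hle : ∀ m ∈ l :: ls, m.1 ≤ r.1 := by
      intro m hm
      rcases List.mem_cons.mp hm with rfl | hm
      · exact not_lt.mp hlt
      · exact le_trans (hlhead m hm) (not_lt.mp hlt)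
    have hperm : (r :: out.1).Perm ((l :: ls) ++ (r :: rs)) := by
      refine (ihp.cons r).trans ?_
      exact List.perm_middle.symm
    refine ⟨hperm, ?_, ihlen, ?_⟩
    · refine List.pairwise_cons.mpr ⟨?_, ihs⟩
      intro q hq
      have hq' : q ∈ (l :: ls) ++ rs := ihp.mem_iff.mp hq
      rcases List.mem_append.mp hq' with h | h
      · exact hle q h
      · exact hrhead q h
    · intro k
      rw [ihget k, pvCross_cons_right _ r rs k hle]

theorem pvMergesortA_spec_aux (n : Nat) : ∀ (pairs : List (Int × Nat)) (res : List Int),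
    pairs.length ≤ n → (∀ p ∈ pairs, p.2 < res.length) →
    (pvMergesortA pairs res).1.Perm pairs ∧
    (pvMergesortA pairs res).1.Pairwise (fun p q => q.1 ≤ p.1) ∧
    (pvMergesortA pairs res).2.length = res.length ∧
    ∀ k, (pvMergesortA pairs res).2.getD k 0 = res.getD k 0 + pvInv pairs k := by
  induction n with
  | zero =>
    intro pairs res hn _
    have : pairs = [] := List.length_eq_zero_iff.mp (Nat.le_zero.mp hn)
    subst this
    rw [pvMergesortA]
    simp [pvInv]
  | succ n ihn =>
    intro pairs res hn hidx
    rw [pvMergesortA]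
    by_cases hlen : pairs.length > 1
    · simp only [hlen, dif_pos]
      set mid := pairs.length / 2 with hmid
      have h1 : (pairs.take mid).length ≤ n := by
        simp only [List.length_take]; omega
      have h2 : (pairs.drop mid).length ≤ n := by
        simp only [List.length_drop]; omega
      obtain ⟨p1, s1, len1, get1⟩ := ihn (pairs.take mid) res h1
        (fun p hp => hidx p (List.mem_of_mem_take hp))
      obtain ⟨p2, s2, len2, get2⟩ := ihn (pairs.drop mid) (pvMergesortA (pairs.take mid) res).2 h2
        (fun p hp => by rw [len1]; exact hidx p (List.mem_of_mem_drop hp))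
      obtain ⟨mp, ms, mlen, mget⟩ := pvMergeA_spec (pvMergesortA (pairs.take mid) res).1
        (pvMergesortA (pairs.drop mid) (pvMergesortA (pairs.take mid) res).2).1
        (pvMergesortA (pairs.drop mid) (pvMergesortA (pairs.take mid) res).2).2
        s1 s2
        (fun l hl => by
          rw [len2, len1]
          exact hidx l (List.mem_of_mem_take (p1.mem_iff.mp hl)))
      refine ⟨?_, ms, by rw [mlen, len2, len1], ?_⟩
      · refine mp.trans ?_
        refine ((p1.append p2).trans ?_)
        rw [List.take_append_drop]
      · intro k
        rw [mget k, get2 k, get1 k,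
          pvCross_perm _ (pairs.take mid) _ (pairs.drop mid) k p1 p2]
        conv_rhs => rw [← List.take_append_drop mid pairs, pvInv_append]
        ring
    · simp only [hlen]
      have hsmall : pairs.length ≤ 1 := by omega
      rcases pairs with _ | ⟨p, _ | ⟨q, l⟩⟩
      · simp [pvInv]
      · simp [pvInv]
      · simp at hsmall

theorem pvMergesortA_spec (pairs : List (Int × Nat)) (res : List Int)
    (hidx : ∀ p ∈ pairs, p.2 < res.length) :
    (pvMergesortA pairs res).1.Perm pairs ∧
    (pvMergesortA pairs res).1.Pairwise (fun p q => q.1 ≤ p.1) ∧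
    (pvMergesortA pairs res).2.length = res.length ∧
    ∀ k, (pvMergesortA pairs res).2.getD k 0 = res.getD k 0 + pvInv pairs k :=
  pvMergesortA_spec_aux pairs.length pairs res le_rfl hidx

theorem pvCountP_zipIdx (xs : List Int) (m : Nat) (x : Int) :
    ((xs.zipIdx m).countP fun q => decide (q.1 < x)) = xs.countP fun y => decide (y < x) := by
  induction xs generalizing m with
  | nil => rfl
  | cons y ys ih => simp [List.zipIdx_cons, List.countP_cons, ih]

theorem pvInv_zipIdx (xs : List Int) (m k : Nat) :
    pvInv (xs.zipIdx m) k = if k < m then 0 else (pvSpecList xs).getD (k - m) 0 := by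
  induction xs generalizing m with
  | nil => simp [pvInv, pvSpecList]
  | cons x rest ih =>
    simp only [List.zipIdx_cons, pvInv, ih, pvSpecList]
    by_cases h1 : k < m
    · have h2 : m ≠ k := by omega
      simp [h2, h1, show k < m + 1 by omega]
    · by_cases h2 : k = m
      · subst h2
        simp [pvCountP_zipIdx, show k < k + 1 by omega, pvCntS]
      · have h3 : ¬ k < m + 1 := by omega
        have h4 : m ≠ k := fun h => h2 h.symm
        have h5 : k - m = (k - (m + 1)) + 1 := by omega
        simp [h4, h1, h3, h5]

theorem pvA_eq_spec (xs : List Int) : shorterBuildings xs = pvSpecList xs := by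
  unfold shorterBuildings
  have hidx : ∀ p ∈ xs.zipIdx, p.2 < (List.replicate xs.length (0 : Int)).length := by
    intro p hp
    have := List.snd_lt_add_of_mem_zipIdx hp
    simpa using this
  obtain ⟨-, -, hlen, hget⟩ := pvMergesortA_spec xs.zipIdx (List.replicate xs.length 0) hidx
  apply List.ext_getElem
  · rw [hlen, pvSpecList_length, List.length_replicate]
  · intro k hk1 hk2
    have h1 := hget k
    rw [pvInv_zipIdx] at h1
    simp only [Nat.not_lt_zero, if_false, Nat.sub_zero] at h1
    have hk3 : k < xs.length := by rwa [pvSpecList_length] at hk2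
    rw [← List.getD_eq_getElem _ 0 hk1, ← List.getD_eq_getElem _ 0 hk2, h1,
      List.getD_eq_getElem _ _ (by simpa using hk3)]
    simp

-- ===== VERDICT (by name: the statement is the Claim_ definition above) =====
theorem shorterBuildings_spec : Claim_equal_shorterBuildings := by
  intro heights _
  unfold Spec_shorterBuildings
  rw [pvA_eq_spec, pvAlt_eq_spec]
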